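-- pv_equiv track=rewrite | github.com/wiz4rd-de/ContentCreationPipeline | seo_pipeline/keywords/filter_keywords.py | _build_blocklist_entries
-- ===== SOURCE A (Python) =====
-- def _build_blocklist_entries(blocklist: dict) -> list[dict]:
--     """Build flat blocklist lookup with deterministic ordering.
--
--     Maps each term to its category for efficient lookup and reason tagging.
--     Sorts by category + term for deterministic first-match behavior.
--
--     Args:
--         blocklist: Dict mapping category to list of terms.
--
--     Returns:
--         List of {term, category} dicts sorted by category then term.
--     """
--     entries = []
--     for category, terms in blocklist.items():
--         if isinstance(terms, list):
--             for term in terms: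
--                 entries.append({"term": term.lower(), "category": category})
--
--     # Sort for deterministic first-match behavior
--     entries.sort(key=lambda e: (e["category"], e["term"]))
--     return entries
-- ===== SOURCE B (Python) =====
-- def _build_blocklist_entries(blocklist: dict) -> list[dict]:
--     """Build flat blocklist lookup with deterministic ordering.
--
--     Visits categories in sorted key order and, within each category, the
--     terms sorted by their lowercased form, so the result comes out already
--     sorted and no global sort over composite tuples is needed.
--     """
--     entries = []
--     for category, terms in sorted(blocklist.items(), key=lambda kv: kv[0]):
--         if isinstance(terms, list):
--             for term in sorted(terms, key=str.lower):
--                 entries.append({"term": term.lower(), "category": category})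
--     return entries
-- ===== Notes on version B (the rewrite author's own statement) =====
-- stated objective: alternative
-- what changed: Instead of collecting an unsorted flat list and sorting it at the end by the composite (category, term) key, B sorts the category keys once and each category's terms (by lowercased form) separately, emitting the entries already in order during a doubly-sorted nested pass.
import Mathlib
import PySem

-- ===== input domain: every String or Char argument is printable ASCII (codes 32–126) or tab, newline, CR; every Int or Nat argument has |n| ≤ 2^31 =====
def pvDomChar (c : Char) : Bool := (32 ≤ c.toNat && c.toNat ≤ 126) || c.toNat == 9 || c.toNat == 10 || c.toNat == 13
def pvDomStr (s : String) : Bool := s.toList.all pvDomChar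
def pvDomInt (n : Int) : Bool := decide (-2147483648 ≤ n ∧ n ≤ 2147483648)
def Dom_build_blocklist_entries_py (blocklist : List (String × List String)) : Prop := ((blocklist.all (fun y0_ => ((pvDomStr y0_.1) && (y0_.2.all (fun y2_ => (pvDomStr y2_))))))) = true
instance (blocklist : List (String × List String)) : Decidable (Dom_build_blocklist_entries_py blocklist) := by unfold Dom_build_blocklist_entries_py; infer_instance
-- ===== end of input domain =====

-- ===== PORT A =====
-- B visits sorted categories and per-category sorted terms instead of one global composite sort.
-- Entry dict {"term": t.lower(), "category": category} as an association list:
def pvMkEntry (c t : String) : List (String × String) := [("term", PySem.Str.lower t), ("category", c)]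

-- Port of A: collect all entries (the 'isinstance(terms, list)' test is always true under the
-- typed signature, so the branch body is unconditional), then sort by the tuple key
-- (e["category"], e["term"]); both keys are always present in the entries the loop built, so
-- Dict.getD with an unused default is exact here.
def build_blocklist_entries_py (blocklist : List (String × List String)) : List (List (String × String)) :=
  let entries : List (List (String × String)) :=
    blocklist.foldl (fun acc p => p.2.foldl (fun acc2 t => acc2 ++ [pvMkEntry p.1 t]) acc) []
  PySem.List.sorted2 entries
    (fun e => PySem.Dict.getD ⟨e⟩ "category" "") (fun e => PySem.Dict.getD ⟨e⟩ "term" "") false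

-- ===== PORT B =====
def build_blocklist_entries_py_alt (blocklist : List (String × List String)) : List (List (String × String)) :=
  (PySem.List.sorted blocklist (fun kv => kv.1) false).foldl
    (fun acc p =>
      (PySem.List.sorted p.2 (fun t => PySem.Str.lower t) false).foldl
        (fun acc2 t => acc2 ++ [pvMkEntry p.1 t]) acc) []

-- ===== PRECONDITION & SPEC =====
-- Pre_ excludes association lists with a duplicate category key: a Python dict cannot contain
-- one, so these inputs do not correspond to any input the Python function receives.
def Pre_build_blocklist_entries_py (blocklist : List (String × List String)) : Prop :=
  (blocklist.map Prod.fst).Nodup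
instance (blocklist : List (String × List String)) : Decidable (Pre_build_blocklist_entries_py blocklist) := by unfold Pre_build_blocklist_entries_py; infer_instance

def pvWitness_build_blocklist_entries_py : (List (String × List String)) :=
  [("b", ["X", "a"]), ("a", ["c", "B"])]

def Spec_build_blocklist_entries_py (blocklist : List (String × List String)) (out : List (List (String × String))) : Prop := out = build_blocklist_entries_py_alt blocklist
instance (blocklist : List (String × List String)) (out : List (List (String × String))) : Decidable (Spec_build_blocklist_entries_py blocklist out) := by unfold Spec_build_blocklist_entries_py; infer_instance

-- ===== CLAIM (what is proved, stated in full; the proofs are below) =====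
def Claim_equal_build_blocklist_entries_py : Prop := ∀ (blocklist : List (String × List String)), Dom_build_blocklist_entries_py blocklist → Pre_build_blocklist_entries_py blocklist → Spec_build_blocklist_entries_py blocklist (build_blocklist_entries_py blocklist)

-- ===== LEMMAS AND PROOFS =====

-- The lexicographic sort key (category, term) of an entry.
def pvKey (e : List (String × String)) : Lex (String × String) :=
  toLex (PySem.Dict.getD ⟨e⟩ "category" "", PySem.Dict.getD ⟨e⟩ "term" "")

theorem pvKey_mk (c t : String) : pvKey (pvMkEntry c t) = toLex (c, PySem.Str.lower t) := rfl

-- sorted2 with keys k1, k2 is sorted with the lexicographic pair key.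
theorem pv_sorted2_eq_sorted_lex {α κ₁ κ₂ : Type} [LinearOrder κ₁] [LinearOrder κ₂]
    (xs : List α) (k1 : α → κ₁) (k2 : α → κ₂) :
    PySem.List.sorted2 xs k1 k2 false = PySem.List.sorted xs (fun x => toLex (k1 x, k2 x)) false := by
  simp only [PySem.List.sorted2, PySem.List.sorted, if_neg (by simp : ¬ (false = true))]
  have hb : (fun a b => decide (k1 a < k1 b) || (!decide (k1 b < k1 a) && decide (k2 a < k2 b)))
      = (fun (a b : α) => decide (toLex (k1 a, k2 a) < toLex (k1 b, k2 b))) := by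
    funext a b
    by_cases h1 : k1 a < k1 b
    · simp [Prod.Lex.lt_iff, h1]
    · by_cases h2 : k1 b < k1 a
      · simp [Prod.Lex.lt_iff, h1, h2, (ne_of_gt h2 : k1 a ≠ k1 b)]
      · have he : k1 a = k1 b := le_antisymm (not_lt.mp h2) (not_lt.mp h1)
        simp [Prod.Lex.lt_iff, he]
  rw [hb]

-- The nested append loop is a flatMap of maps.
theorem pv_nested_foldl (l : List (String × List String)) (f : String × List String → List String)
    (acc : List (List (String × String))) :
    l.foldl (fun acc p => (f p).foldl (fun acc2 t => acc2 ++ [pvMkEntry p.1 t]) acc) acc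
      = acc ++ l.flatMap (fun p => (f p).map (pvMkEntry p.1)) := by
  induction l generalizing acc with
  | nil => simp
  | cons p l ih =>
      rw [List.foldl_cons, PySem.List.foldl_append_singleton_eq_map, ih, List.flatMap_cons,
        List.append_assoc]

theorem build_blocklist_entries_py_spec : Claim_equal_build_blocklist_entries_py := by
  intro bl _hdom hpre
  unfold Spec_build_blocklist_entries_py
  unfold build_blocklist_entries_py build_blocklist_entries_py_alt
  rw [pv_nested_foldl bl (fun p => p.2), pv_sorted2_eq_sorted_lex,
      pv_nested_foldl _ (fun p => PySem.List.sorted p.2 (fun t => PySem.Str.lower t) false)]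
  simp only [List.nil_append]
  set g : String × List String → List (List (String × String)) :=
    fun p => p.2.map (pvMkEntry p.1) with hg
  set g' : String × List String → List (List (String × String)) :=
    fun p => (PySem.List.sorted p.2 (fun t => PySem.Str.lower t) false).map (pvMkEntry p.1) with hg'
  set S := PySem.List.sorted bl (fun kv => kv.1) false with hS
  -- membership shapes
  have hmemE : ∀ x ∈ bl.flatMap g, ∃ c t, x = pvMkEntry c t := by
    intro x hx
    simp only [hg, List.mem_flatMap, List.mem_map] at hx
    obtain ⟨p, _, t, _, rfl⟩ := hx
    exact ⟨p.1, t, rfl⟩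
  have hmemB : ∀ x ∈ S.flatMap g', ∃ c t, x = pvMkEntry c t := by
    intro x hx
    simp only [hg', List.mem_flatMap, List.mem_map] at hx
    obtain ⟨p, _, t, _, rfl⟩ := hx
    exact ⟨p.1, t, rfl⟩
  -- permutations
  have hSperm : S.Perm bl := PySem.List.sorted_perm bl (fun kv => kv.1) false
  have hA : (PySem.List.sorted (bl.flatMap g) pvKey false).Perm (bl.flatMap g) :=
    PySem.List.sorted_perm _ _ _
  have hB : (S.flatMap g').Perm (bl.flatMap g) := by
    refine (List.Perm.flatMap_left S ?_).trans (List.Perm.flatMap_right g hSperm)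
    · intro p _
      exact (PySem.List.sorted_perm p.2 (fun t => PySem.Str.lower t) false).map (pvMkEntry p.1)
  -- pairwise orderings
  have hpA : (PySem.List.sorted (bl.flatMap g) pvKey false).Pairwise
      (fun a b => pvKey a ≤ pvKey b) := PySem.List.sorted_pairwise _ _
  have hSlt : S.Pairwise (fun p q => p.1 < q.1) := by
    have h1 : S.Pairwise (fun p q => p.1 ≤ q.1) :=
      PySem.List.sorted_pairwise bl (fun kv => kv.1)
    have h2 : (S.map Prod.fst).Nodup := ((hSperm.map Prod.fst).nodup_iff).mpr hpre
    rw [List.nodup_iff_pairwise_ne, List.pairwise_map] at h2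
    exact (h1.and h2).imp (fun h => lt_of_le_of_ne h.1 h.2)
  have hpB : (S.flatMap g').Pairwise (fun a b => pvKey a ≤ pvKey b) := by
    rw [List.pairwise_flatMap]
    constructor
    · intro p _
      have := PySem.List.sorted_pairwise p.2 (fun t => PySem.Str.lower t)
      rw [hg', List.pairwise_map]
      exact this.imp (fun h => by
        rw [pvKey_mk, pvKey_mk]
        exact le_of_eq_of_le rfl (Prod.Lex.le_iff.mpr (Or.inr ⟨rfl, h⟩)))
    · refine hSlt.imp ?_
      intro p q hpq x hx y hy
      simp only [hg', List.mem_map] at hx hy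
      obtain ⟨t, _, rfl⟩ := hx
      obtain ⟨u, _, rfl⟩ := hy
      rw [pvKey_mk, pvKey_mk]
      exact le_of_lt (Prod.Lex.lt_iff.mpr (Or.inl hpq))
  -- antisymmetry on the members: equal keys mean equal entries
  refine List.Perm.eq_of_pairwise ?_ hpA hpB (hA.trans hB.symm)
  intro a b ha hb hab hba
  obtain ⟨c, t, rfl⟩ := hmemE a (hA.mem_iff.mp ha)
  obtain ⟨c', t', rfl⟩ := hmemB b hb
  have hk : pvKey (pvMkEntry c t) = pvKey (pvMkEntry c' t') := le_antisymm hab hba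
  rw [pvKey_mk, pvKey_mk] at hk
  have hk' : (c, PySem.Str.lower t) = (c', PySem.Str.lower t') := congrArg ofLex hk
  simp only [Prod.mk.injEq] at hk'
  simp [pvMkEntry, hk'.1, hk'.2]
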